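-- pv_equiv track=rewrite | github.com/vitalfadeev/sqlinterface | sqlinterface/sqlinterface.py | format_insert_columns_to_sql
-- ===== SOURCE A (Python) =====
-- def format_insert_columns_to_sql( ColSet ):
--     """ in:  {"Col1":1, "Col2":2}
--         out: (
--               "Col1, Col2",
--               "%s, %s",
--               [1, 2]]
--              )
--     """
--     cols_sqls = []
--     vals_sqls = []
--     values = []
--
--     for col, value in ColSet.items():
--         cols_sqls.append( "`{}`".format(col) )
--         vals_sqls.append( "%s" )
--         values.append( value )
--
--     cols_sql = ", ".join(cols_sqls)
--     vals_sql = ", ".join(vals_sqls)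
--
--     return (cols_sql, vals_sql, values)
-- ===== SOURCE B (Python) =====
-- def format_insert_columns_to_sql(ColSet):
--     cols_sql = ""
--     vals_sql = ""
--     values = []
--     for col, value in ColSet.items():
--         if values:
--             cols_sql += ", `" + col + "`"
--             vals_sql += ", %s"
--         else:
--             cols_sql = "`" + col + "`"
--             vals_sql = "%s"
--         values.append(value)
--     return (cols_sql, vals_sql, values)
-- ===== Notes on version B (the rewrite author's own statement) =====
-- stated objective: alternative
-- what changed: A collects per-column fragments into three lists and then runs two ', '.join passes; B never builds fragment lists or calls join: one pass concatenates the two SQL strings directly, deciding the leading separator from whether any value has been emitted yet.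
import Mathlib
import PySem

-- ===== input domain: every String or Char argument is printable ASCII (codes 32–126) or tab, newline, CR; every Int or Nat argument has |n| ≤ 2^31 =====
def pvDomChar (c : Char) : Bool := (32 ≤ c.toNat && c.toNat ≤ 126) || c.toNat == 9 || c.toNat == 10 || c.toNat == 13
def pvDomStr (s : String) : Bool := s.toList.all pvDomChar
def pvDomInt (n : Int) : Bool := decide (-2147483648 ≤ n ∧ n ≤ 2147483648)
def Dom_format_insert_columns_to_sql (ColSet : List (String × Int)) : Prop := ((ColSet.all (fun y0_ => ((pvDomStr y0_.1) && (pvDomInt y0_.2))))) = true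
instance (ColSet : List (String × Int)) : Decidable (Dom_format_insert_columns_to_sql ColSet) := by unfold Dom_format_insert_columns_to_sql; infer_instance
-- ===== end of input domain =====

-- B replaces A's fragment-list collection plus two ", ".join passes by a single pass that concatenates the two SQL strings directly, branching on whether a separator is needed; alternative decomposition, same O(n) cost.


-- ===== PORT A =====
def format_insert_columns_to_sql (ColSet : List (String × Int)) : String × String × List Int :=
  -- ColSet models the Python dict: iterate its entries as dict.items() does (PySem.Dict.ofList = dict(pairs))
  let loop := (PySem.Dict.ofList ColSet).items.foldl
    (fun (acc : List String × List String × List Int) (p : String × Int) =>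
      (acc.1 ++ ["`" ++ p.1 ++ "`"], acc.2.1 ++ ["%s"], acc.2.2 ++ [p.2]))
    ([], [], [])
  (PySem.Str.join ", " loop.1, PySem.Str.join ", " loop.2.1, loop.2.2)

-- ===== PORT B =====
-- Source B's loop body: `if values:` → append with a leading ", " separator, else start the strings
def pvStepB (acc : String × String × List Int) (p : String × Int) : String × String × List Int :=
  if acc.2.2 ≠ [] then
    (acc.1 ++ ", `" ++ p.1 ++ "`", acc.2.1 ++ ", %s", acc.2.2 ++ [p.2])
  else
    ("`" ++ p.1 ++ "`", "%s", acc.2.2 ++ [p.2])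

def format_insert_columns_to_sql_alt (ColSet : List (String × Int)) : String × String × List Int :=
  (PySem.Dict.ofList ColSet).items.foldl pvStepB ("", "", [])

-- ===== PRECONDITION & SPEC =====
def Spec_format_insert_columns_to_sql (ColSet : List (String × Int)) (out : String × String × List Int) : Prop := out = format_insert_columns_to_sql_alt ColSet
instance (ColSet : List (String × Int)) (out : String × String × List Int) : Decidable (Spec_format_insert_columns_to_sql ColSet out) := by unfold Spec_format_insert_columns_to_sql; infer_instance

-- ===== CLAIM (what is proved, stated in full; the proofs are below) =====
def Claim_equal_format_insert_columns_to_sql : Prop := ∀ (ColSet : List (String × Int)), Dom_format_insert_columns_to_sql ColSet → Spec_format_insert_columns_to_sql ColSet (format_insert_columns_to_sql ColSet)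

-- ===== LEMMAS AND PROOFS =====

theorem pv_str_eq_of_toList {s t : String} (h : s.toList = t.toList) : s = t :=
  String.toList_injective h

-- what B's loop appends after the first entry, as straight-line recursions
def pvColsTail : List (String × Int) → String
  | [] => ""
  | p :: t => ", `" ++ p.1 ++ "`" ++ pvColsTail t

def pvValsTail : List (String × Int) → String
  | [] => ""
  | _ :: t => ", %s" ++ pvValsTail t

theorem pv_loopA (l : List (String × Int)) (c v : List String) (vs : List Int) :
    l.foldl
      (fun (acc : List String × List String × List Int) (p : String × Int) =>
        (acc.1 ++ ["`" ++ p.1 ++ "`"], acc.2.1 ++ ["%s"], acc.2.2 ++ [p.2]))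
      (c, v, vs)
    = (c ++ l.map (fun p => "`" ++ p.1 ++ "`"),
       v ++ List.replicate l.length "%s",
       vs ++ l.map (·.2)) := by
  induction l generalizing c v vs with
  | nil => simp
  | cons p t ih =>
      simp [List.foldl_cons, ih, List.append_assoc]
      rw [← List.replicate_succ, List.replicate_succ']

theorem pv_loopB (l : List (String × Int)) (c v : String) (vs : List Int) (h : vs ≠ []) :
    l.foldl pvStepB (c, v, vs) = (c ++ pvColsTail l, v ++ pvValsTail l, vs ++ l.map (·.2)) := by
  induction l generalizing c v vs with
  | nil => simp [pvColsTail, pvValsTail]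
  | cons p t ih =>
      have hstep : pvStepB (c, v, vs) p
          = (c ++ ", `" ++ p.1 ++ "`", v ++ ", %s", vs ++ [p.2]) := by
        simp [pvStepB, h]
      rw [List.foldl_cons, hstep, ih _ _ _ (by simp)]
      refine Prod.ext ?_ (Prod.ext ?_ ?_)
      · exact pv_str_eq_of_toList (by simp [pvColsTail])
      · exact pv_str_eq_of_toList (by simp [pvValsTail])
      · simp

theorem pv_colsA (p : String × Int) (t : List (String × Int)) :
    PySem.Str.join ", " ((p :: t).map (fun q => "`" ++ q.1 ++ "`"))
    = "`" ++ p.1 ++ "`" ++ pvColsTail t := by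
  induction t generalizing p with
  | nil =>
      exact pv_str_eq_of_toList (by
        simp [PySem.Str.toList_join, PySem.Chars.join_singleton, pvColsTail])
  | cons q u ih =>
      apply pv_str_eq_of_toList
      have ihl := congrArg String.toList (ih q)
      simp only [List.map_cons, PySem.Str.toList_join] at ihl ⊢
      rw [PySem.Chars.join_cons_cons, ihl]
      simp [pvColsTail]

theorem pv_valsA (t : List (String × Int)) :
    PySem.Str.join ", " (List.replicate (t.length + 1) "%s")
    = "%s" ++ pvValsTail t := by
  induction t with
  | nil =>
      exact pv_str_eq_of_toList (by
        simp [List.replicate_succ, PySem.Str.toList_join, PySem.Chars.join_singleton, pvValsTail])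
  | cons q u ih =>
      apply pv_str_eq_of_toList
      have ihl := congrArg String.toList ih
      simp only [PySem.Str.toList_join, List.length_cons, List.replicate_succ, List.map_cons,
        List.map_replicate] at ihl ⊢
      rw [PySem.Chars.join_cons_cons, ihl]
      simp [pvValsTail]

-- ===== VERDICT (by name: the statement is the Claim_ definition above) =====
theorem format_insert_columns_to_sql_spec : Claim_equal_format_insert_columns_to_sql := by
  intro ColSet _
  unfold Spec_format_insert_columns_to_sql
  unfold format_insert_columns_to_sql format_insert_columns_to_sql_alt
  simp only [pv_loopA, List.nil_append]
  cases (PySem.Dict.ofList ColSet).items with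
  | nil => simp [PySem.Str.join, PySem.Chars.join, List.intercalate]
  | cons p t =>
      rw [List.foldl_cons]
      have hstep : pvStepB ("", "", ([] : List Int)) p = ("`" ++ p.1 ++ "`", "%s", [p.2]) := by
        simp [pvStepB]
      rw [hstep, pv_loopB _ _ _ _ (by simp), pv_colsA]
      simp only [List.length_cons]
      rw [pv_valsA]
      simp
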